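-- pv_equiv track=rewrite | github.com/syjoe02/Django-test | django_test/spec_builder.py | _extract_path_params
-- ===== SOURCE A (Python) =====
-- from typing import List, Dict, Any, Optional
--
-- def _extract_path_params(url: str) -> List[Dict[str, str]]:
--     """
--     Convert: /api/calendar/events/<uuid:event_id>/
--     -> [{"name": "event_id", "type": "uuid"}]
--     """
--     params = []
--     if "<" in url and ">" in url:
--         parts = url.split("<")[1:]
--         for p in parts:
--             if ">" in p:
--                 content = p.split(">")[0]  # e.g. "uuid:event_id"
--                 if ":" in content:
--                     typ, name = content.split(":", 1)
--                 else:
--                     typ, name = "str", content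
--                 params.append({"name": name, "type": typ})
--     return params
-- ===== SOURCE B (Python) =====
-- def _extract_path_params(url):
--     """Single-pass scanner: walk the characters once, collecting each <...> body
--     directly with a tiny state machine instead of splitting into segment lists."""
--     params = []
--     body = None  # None = outside a parameter; else the chars seen since the last '<'
--     for ch in url:
--         if body is None:
--             if ch == '<':
--                 body = []
--         elif ch == '>':
--             content = ''.join(body)
--             if ':' in content:
--                 typ, name = content.split(':', 1)
--             else:
--                 typ, name = 'str', content
--             params.append({'name': name, 'type': typ})
--             body = None
--         elif ch == '<':
--             body = []
--         else:
--             body.append(ch)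
--     return params
-- ===== Notes on version B (the rewrite author's own statement) =====
-- stated objective: alternative
-- what changed: Replaced A's two-stage split-based segmentation (split the url on the opening bracket, then split each piece on the closing bracket) with a single-pass character scanner (a tiny state machine) that collects each <...> body directly.
import Mathlib
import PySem

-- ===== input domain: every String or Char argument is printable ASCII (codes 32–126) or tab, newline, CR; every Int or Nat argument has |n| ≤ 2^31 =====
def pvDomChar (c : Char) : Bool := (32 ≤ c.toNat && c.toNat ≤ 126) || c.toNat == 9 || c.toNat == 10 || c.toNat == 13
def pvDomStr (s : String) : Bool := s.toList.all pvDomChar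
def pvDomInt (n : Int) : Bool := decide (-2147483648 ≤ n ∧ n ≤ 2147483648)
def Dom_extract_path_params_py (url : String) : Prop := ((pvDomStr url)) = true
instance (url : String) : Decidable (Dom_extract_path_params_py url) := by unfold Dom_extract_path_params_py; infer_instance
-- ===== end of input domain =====

-- B replaces A's two-stage split-based segmentation by a single-pass character scanner (alternative decomposition, same cost).

-- ===== PORT A =====
-- shared step, identical verbatim in both Pythons: turn a captured body ("typ:name" or "name") into the dict
-- {"name": …, "type": …}; content.split(":", 1) is PySem.Chars.splitOnMax content [':'] 1 (with ':' present it
-- has exactly two pieces, so the catch-all branch is unreachable)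
def pvEntry (content : List Char) : List (String × String) :=
  if PySem.Chars.isIn [':'] content then
    match PySem.Chars.splitOnMax content [':'] 1 with
    | [typ, name] => [("name", String.ofList name), ("type", String.ofList typ)]
    | _ => []
  else [("name", String.ofList content), ("type", "str")]

def extract_path_params_py (url : String) : List (List (String × String)) :=
  if PySem.Chars.isIn ['<'] url.toList && PySem.Chars.isIn ['>'] url.toList then
    ((PySem.Chars.splitOn url.toList ['<']).drop 1).foldl
      (fun params p =>
        if PySem.Chars.isIn ['>'] p then
          params ++ [pvEntry ((PySem.Chars.splitOn p ['>']).headD [])]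
        else params) []
  else []

-- ===== PORT B =====
-- scanner state: none = outside a parameter; some acc = the chars seen since the last '<'
def pvScan : List Char → Option (List Char) → List (List Char)
  | [], _ => []
  | c :: rest, none => if c = '<' then pvScan rest (some []) else pvScan rest none
  | c :: rest, some acc =>
      if c = '>' then acc :: pvScan rest none
      else if c = '<' then pvScan rest (some [])
      else pvScan rest (some (acc ++ [c]))

def extract_path_params_py_alt (url : String) : List (List (String × String)) :=
  (pvScan url.toList none).map pvEntry

-- ===== PRECONDITION & SPEC =====
def Spec_extract_path_params_py (url : String) (out : List (List (String × String))) : Prop := out = extract_path_params_py_alt url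
instance (url : String) (out : List (List (String × String))) : Decidable (Spec_extract_path_params_py url out) := by unfold Spec_extract_path_params_py; infer_instance

-- ===== CLAIM (what is proved, stated in full; the proofs are below) =====
def Claim_equal_extract_path_params_py : Prop := ∀ (url : String), Dom_extract_path_params_py url → Spec_extract_path_params_py url (extract_path_params_py url)

-- ===== LEMMAS AND PROOFS =====

-- clean structural form of cs.split(sep) for a one-character separator
def pvSplit (sep : Char) : List Char → List (List Char)
  | [] => [[]]
  | c :: rest =>
      if c = sep then [] :: pvSplit sep rest
      else match pvSplit sep rest with
           | [] => [[c]]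
           | h :: t => (c :: h) :: t

def pvConsHead (pre : List Char) : List (List Char) → List (List Char)
  | [] => [pre]
  | h :: t => (pre ++ h) :: t

lemma pvSplit_ne_nil (sep : Char) (cs : List Char) : pvSplit sep cs ≠ [] := by
  cases cs with
  | nil => simp [pvSplit]
  | cons c rest =>
      simp only [pvSplit]
      split_ifs
      · simp
      · cases h : pvSplit sep rest <;> simp

lemma go_eq (sep : Char) : ∀ (fuel : Nat) (l cur : List Char) (accs : List (List Char)),
    l.length < fuel →
    PySem.Chars.splitOn.go [sep] fuel l cur accs = accs.reverse ++ pvConsHead cur.reverse (pvSplit sep l) := by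
  intro fuel
  induction fuel with
  | zero => intro l cur accs h; omega
  | succ f ih =>
      intro l cur accs h
      cases l with
      | nil => simp [PySem.Chars.splitOn.go, pvSplit, pvConsHead]
      | cons c rest =>
          rw [PySem.Chars.splitOn.go]
          by_cases hc : c = sep
          · rw [if_pos (by simp [hc, List.isPrefixOf])]
            rw [show List.drop [sep].length (c :: rest) = rest from by simp]
            rw [ih rest [] (cur.reverse :: accs) (by simp at h; omega)]
            simp only [pvSplit, hc, List.reverse_cons, List.reverse_nil]
            cases hs : pvSplit sep rest with
            | nil => exact absurd hs (pvSplit_ne_nil sep rest)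
            | cons h t => simp [pvConsHead]
          · rw [if_neg (by simp [List.isPrefixOf]; exact fun h' => hc h'.symm)]
            rw [ih rest (c :: cur) accs (by simp at h; omega)]
            simp only [pvSplit, if_neg hc, List.reverse_cons]
            cases hs : pvSplit sep rest with
            | nil => exact absurd hs (pvSplit_ne_nil sep rest)
            | cons h t => simp [pvConsHead]

lemma splitOn_eq (cs : List Char) (sep : Char) :
    PySem.Chars.splitOn cs [sep] = pvConsHead [] (pvSplit sep cs) := by
  unfold PySem.Chars.splitOn
  rw [go_eq sep (cs.length + 1) cs [] [] (by omega)]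
  simp

lemma pvConsHead_nil (l : List (List Char)) (h : l ≠ []) : pvConsHead [] l = l := by
  cases l with
  | nil => exact absurd rfl h
  | cons a t => simp [pvConsHead]

lemma splitOn_eq' (cs : List Char) (sep : Char) :
    PySem.Chars.splitOn cs [sep] = pvSplit sep cs := by
  rw [splitOn_eq, pvConsHead_nil _ (pvSplit_ne_nil sep cs)]

lemma isIn_singleton (c : Char) (cs : List Char) :
    PySem.Chars.isIn [c] cs = true ↔ c ∈ cs := by
  rw [PySem.Chars.isIn_iff_infix]
  constructor
  · rintro ⟨pre, suf, h⟩
    subst h; simp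
  · intro h
    obtain ⟨pre, suf, h⟩ := List.mem_iff_append.mp h
    exact ⟨pre, suf, by simp [h]⟩

-- A-side: the bodies A keeps, from the split segments
def pvSegs : List (List Char) → List (List Char)
  | [] => []
  | p :: t => if '>' ∈ p then ((pvSplit '>' p).headD []) :: pvSegs t else pvSegs t

lemma head_pvSplit_emit (h : List Char) : ∀ (acc : List Char), '>' ∉ acc →
    (pvSplit '>' (acc ++ '>' :: h)).headD [] = acc := by
  intro acc
  induction acc with
  | nil => intro _; simp [pvSplit]
  | cons c a ih =>
      intro hmem
      have hc : c ≠ '>' := fun hc => hmem (by simp [hc])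
      simp only [List.cons_append, pvSplit, if_neg hc]
      have hne := pvSplit_ne_nil '>' (a ++ '>' :: h)
      cases hs : pvSplit '>' (a ++ '>' :: h) with
      | nil => exact absurd hs hne
      | cons p t =>
          have := ih (fun hm => hmem (by simp [hm]))
          rw [hs] at this
          simp at this
          simp [this]

lemma mem_of_mem_pvSplit (sep : Char) : ∀ (cs : List Char), ∀ p ∈ pvSplit sep cs, ∀ c ∈ p, c ∈ cs := by
  intro cs
  induction cs with
  | nil => intro p hp c hc; simp [pvSplit] at hp; simp [hp] at hc
  | cons a rest ih =>
      intro p hp c hc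
      simp only [pvSplit] at hp
      split_ifs at hp with ha
      · rcases List.mem_cons.mp hp with h1 | h1
        · subst h1; simp at hc
        · exact List.mem_cons_of_mem a (ih p h1 c hc)
      · cases hs : pvSplit sep rest with
        | nil => exact absurd hs (pvSplit_ne_nil sep rest)
        | cons h t =>
            rw [hs] at hp
            rcases List.mem_cons.mp hp with h1 | h1
            · subst h1
              rcases List.mem_cons.mp hc with h2 | h2
              · simp [h2]
              · exact List.mem_cons_of_mem a (ih h (by simp [hs]) c h2)
            · exact List.mem_cons_of_mem a (ih p (by simp [hs, h1]) c hc)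

lemma pvSegs_of_no_gt : ∀ (segs : List (List Char)), (∀ p ∈ segs, '>' ∉ p) → pvSegs segs = [] := by
  intro segs
  induction segs with
  | nil => intro _; rfl
  | cons p t ih =>
      intro h
      simp only [pvSegs, if_neg (h p (by simp))]
      exact ih (fun q hq => h q (by simp [hq]))

-- state interpretation for the scanner
def pvStSegs : Option (List Char) → List (List Char) → List (List Char)
  | none, segs => segs.drop 1
  | some acc, segs => pvConsHead acc segs

lemma scan_eq : ∀ (cs : List Char) (st : Option (List Char)),
    (∀ acc, st = some acc → '>' ∉ acc) →
    pvScan cs st = pvSegs (pvStSegs st (pvSplit '<' cs)) := by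
  intro cs
  induction cs with
  | nil =>
      intro st h
      cases st with
      | none => simp [pvScan, pvSplit, pvStSegs, pvSegs]
      | some acc =>
          simp only [pvScan, pvSplit, pvStSegs, pvConsHead, List.append_nil]
          simp [pvSegs, h acc rfl]
  | cons c rest ih =>
      intro st h
      cases st with
      | none =>
          simp only [pvScan]
          by_cases hc : c = '<'
          · rw [if_pos hc, ih (some []) (by intro a ha; cases ha; simp)]
            simp only [pvStSegs]
            rw [pvConsHead_nil _ (pvSplit_ne_nil '<' rest)]
            simp [pvSplit, hc]
          · rw [if_neg hc, ih none (by intro a ha; cases ha)]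
            simp only [pvSplit, if_neg hc, pvStSegs]
            cases hs : pvSplit '<' rest with
            | nil => exact absurd hs (pvSplit_ne_nil '<' rest)
            | cons p t => simp
      | some acc =>
          have hacc : '>' ∉ acc := h acc rfl
          simp only [pvScan]
          by_cases hgt : c = '>'
          · rw [if_pos hgt, ih none (by intro a ha; cases ha)]
            subst hgt
            have hne : ('>' : Char) ≠ '<' := by decide
            simp only [pvSplit, if_neg hne, pvStSegs]
            cases hs : pvSplit '<' rest with
            | nil => exact absurd hs (pvSplit_ne_nil '<' rest)
            | cons p t =>
                simp only [pvConsHead, pvSegs]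
                rw [if_pos (by simp), head_pvSplit_emit p acc hacc]
                simp
          · rw [if_neg hgt]
            by_cases hc : c = '<'
            · rw [if_pos hc, ih (some []) (by intro a ha; cases ha; simp)]
              simp only [pvSplit, hc, pvStSegs, pvConsHead]
              cases hs : pvSplit '<' rest with
              | nil => exact absurd hs (pvSplit_ne_nil '<' rest)
              | cons p t => simp [pvSegs, hacc]
            · rw [if_neg hc, ih (some (acc ++ [c]))
                (by intro a ha; cases ha; simp [hacc]; exact fun h' => hgt h'.symm)]
              simp only [pvSplit, if_neg hc, pvStSegs]
              cases hs : pvSplit '<' rest with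
              | nil => exact absurd hs (pvSplit_ne_nil '<' rest)
              | cons p t => simp [pvConsHead]

lemma fold_eq : ∀ (parts : List (List Char)) (acc0 : List (List (String × String))),
    parts.foldl
      (fun params p =>
        if PySem.Chars.isIn ['>'] p then
          params ++ [pvEntry ((PySem.Chars.splitOn p ['>']).headD [])]
        else params) acc0
    = acc0 ++ (pvSegs parts).map pvEntry := by
  intro parts
  induction parts with
  | nil => intro acc0; simp [pvSegs]
  | cons p t ih =>
      intro acc0
      simp only [List.foldl_cons]
      by_cases hp : '>' ∈ p
      · rw [if_pos ((isIn_singleton '>' p).mpr hp), ih]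
        simp [pvSegs, hp, splitOn_eq']
      · rw [if_neg (by rw [isIn_singleton]; exact hp), ih]
        simp [pvSegs, hp]

lemma pvSplit_no_sep (sep : Char) : ∀ (cs : List Char), sep ∉ cs → pvSplit sep cs = [cs] := by
  intro cs
  induction cs with
  | nil => intro _; rfl
  | cons c rest ih =>
      intro h
      have hc : c ≠ sep := fun hc => h (by simp [hc])
      simp only [pvSplit, if_neg hc, ih (fun hm => h (by simp [hm]))]

lemma main_eq (url : String) : extract_path_params_py url = extract_path_params_py_alt url := by
  unfold extract_path_params_py extract_path_params_py_alt
  rw [scan_eq url.toList none (by intro a ha; cases ha)]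
  simp only [pvStSegs]
  by_cases hlt : '<' ∈ url.toList
  · by_cases hgt : '>' ∈ url.toList
    · rw [if_pos (by rw [isIn_singleton '<' url.toList |>.mpr hlt, isIn_singleton '>' url.toList |>.mpr hgt]; rfl)]
      rw [splitOn_eq', fold_eq]
      simp
    · rw [if_neg (by rw [Bool.and_eq_true]; rintro ⟨-, h2⟩; exact hgt ((isIn_singleton '>' url.toList).mp h2))]
      rw [pvSegs_of_no_gt _ (fun p hp hm => hgt (mem_of_mem_pvSplit '<' url.toList p (List.mem_of_mem_drop hp) '>' hm))]
      simp
  · rw [if_neg (by rw [Bool.and_eq_true]; rintro ⟨h1, -⟩; exact hlt ((isIn_singleton '<' url.toList).mp h1))]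
    rw [pvSplit_no_sep '<' url.toList hlt]
    simp [pvSegs]

-- ===== VERDICT (by name: the statement is the Claim_ definition above) =====
theorem extract_path_params_py_spec : Claim_equal_extract_path_params_py := by
  intro url _
  exact main_eq url
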